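-- pv_equiv track=rewrite | github.com/YuanG1944/COMP9021_19T3_ALL | 9021 Python/9021 assignment_1/Ass1_main.py | split_list_4
-- ===== SOURCE A (Python) =====
-- def split_list_4(l):
--     list = []
--     for value in l:
--         if len(value) >= 3 and value[0] != value[-1]:
--             value = value[::-1]
--             k = [value[i:i + 2][::-1] for i in range(0, len(value), 2)]
--             k = k[::-1]
--             for val in k:
--                 list.append(val)
--         else:
--             list.append(value)
--     return list
-- ===== SOURCE B (Python) =====
-- def split_list_4(l):
--     result = []
--     for value in l:
--         if len(value) >= 3 and value[0] != value[-1]: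
--             start = len(value) % 2
--             if start:
--                 result.append(value[0:1])
--             for i in range(start, len(value), 2):
--                 result.append(value[i:i + 2])
--         else:
--             result.append(value)
--     return result
-- ===== Notes on version B (the rewrite author's own statement) =====
-- stated objective: simpler
-- what changed: B computes the right-aligned pair chunks directly with a parity offset (leading singleton for odd length, then forward slices value[i:i+2] from start=len%2), eliminating all three reversal passes A performs.
import Mathlib
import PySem

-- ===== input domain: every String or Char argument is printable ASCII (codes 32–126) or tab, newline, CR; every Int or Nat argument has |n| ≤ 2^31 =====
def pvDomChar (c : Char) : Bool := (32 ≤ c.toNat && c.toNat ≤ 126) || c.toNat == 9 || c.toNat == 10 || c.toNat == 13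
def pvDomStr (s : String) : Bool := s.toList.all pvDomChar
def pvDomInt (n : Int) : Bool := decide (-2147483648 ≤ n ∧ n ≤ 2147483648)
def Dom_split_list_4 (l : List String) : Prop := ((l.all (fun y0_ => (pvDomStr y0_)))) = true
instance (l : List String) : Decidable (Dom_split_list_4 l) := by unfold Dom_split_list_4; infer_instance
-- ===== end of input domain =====

-- B drops A's three reversals (reverse the string, reverse each pair chunk, reverse the chunk
-- list) and emits the right-aligned chunks directly: a leading singleton when the length is
-- odd, then forward slices value[i:i+2]; objective: simpler.

-- ===== PORT A =====
-- s[::-1]: slice? with step -1 is always some; getD's default is unreachable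
def pvRevStr (s : String) : String := (PySem.Str.slice? s none none (-1)).getD s

-- k[::-1] on a list
def pvRevList (k : List String) : List String := (PySem.List.slice? k none none (-1)).getD k

def split_list_4 (l : List String) : List String :=
  l.foldl (fun acc value =>
    if 3 ≤ PySem.Str.len value ∧ PySem.Str.pyGet? value 0 ≠ PySem.Str.pyGet? value (-1) then
      let v := pvRevStr value
      let k := (PySem.List.pyRange 0 (PySem.Str.len v) 2).map
        (fun i => pvRevStr (PySem.Str.slice v (some i) (some (i + 2))))
      let k2 := pvRevList k
      k2.foldl (fun acc2 val => acc2 ++ [val]) acc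
    else acc ++ [value]) []

-- ===== PORT B =====
def split_list_4_alt (l : List String) : List String :=
  l.foldl (fun acc value =>
    if 3 ≤ PySem.Str.len value ∧ PySem.Str.pyGet? value 0 ≠ PySem.Str.pyGet? value (-1) then
      let start := PySem.Int.mod (PySem.Str.len value) 2
      let acc1 := if start ≠ 0 then acc ++ [PySem.Str.slice value (some 0) (some 1)] else acc
      (PySem.List.pyRange start (PySem.Str.len value) 2).foldl
        (fun a i => a ++ [PySem.Str.slice value (some i) (some (i + 2))]) acc1
    else acc ++ [value]) []

-- ===== PRECONDITION & SPEC =====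
def Spec_split_list_4 (l : List String) (out : List String) : Prop := out = split_list_4_alt l
instance (l : List String) (out : List String) : Decidable (Spec_split_list_4 l out) := by unfold Spec_split_list_4; infer_instance

-- ===== CLAIM (what is proved, stated in full; the proofs are below) =====
def Claim_equal_split_list_4 : Prop := ∀ (l : List String), Dom_split_list_4 l → Spec_split_list_4 l (split_list_4 l)

-- ===== LEMMAS AND PROOFS =====
theorem pyRange2_nil (a b : Int) (h : b ≤ a) : PySem.List.pyRange a b 2 = [] := by
  rw [PySem.List.pyRange_of_pos _ _ (by norm_num)]; rw [if_neg (by omega)]; simp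

theorem pyRange2_cons (a b : Int) (h : a < b) :
    PySem.List.pyRange a b 2 = a :: PySem.List.pyRange (a + 2) b 2 := by
  rw [PySem.List.pyRange_of_pos _ _ (by norm_num : (0:Int) < 2),
      PySem.List.pyRange_of_pos _ _ (by norm_num : (0:Int) < 2)]
  rw [if_pos h]
  have h2 : ((b - a + 2 - 1)/2).toNat
      = (if a + 2 < b then ((b - (a + 2) + 2 - 1)/2).toNat else 0) + 1 := by
    split_ifs <;> omega
  rw [h2, List.range_succ_eq_map]
  simp only [List.map_cons, List.map_map]
  congr 1
  · ring
  · apply List.map_congr_left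
    intro k _
    simp only [Function.comp_apply]
    push_cast
    ring

def chunkPairs {α : Type} : List α → List (List α)
  | [] => []
  | [a] => [[a]]
  | a :: b :: t => [a, b] :: chunkPairs t

def rightChunks {α : Type} (cs : List α) : List (List α) :=
  (if cs.length % 2 = 1 then [cs.take 1] else []) ++ chunkPairs (cs.drop (cs.length % 2))

theorem mapslice {α : Type} (cs : List α) (pre : List α) :
    (PySem.List.pyRange (pre.length : Int) ((pre.length : Int) + (cs.length : Int)) 2).map
      (fun i => PySem.List.slice (pre ++ cs) (some i) (some (i + 2))) = chunkPairs cs := by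
  induction cs using chunkPairs.induct generalizing pre with
  | case1 =>
    rw [show ((pre.length : Int) + ((List.length ([] : List α)) : Int)) = (pre.length : Int) by simp]
    rw [pyRange2_nil _ _ le_rfl]
    rfl
  | case2 a =>
    rw [pyRange2_cons _ _ (by simp), List.map_cons]
    rw [pyRange2_nil _ _ (by simp)]
    simp only [List.map_nil]
    rw [show ((pre.length : Int) + 2) = ((pre.length : Int) + ((2:Nat) : Int)) by norm_num]
    rw [PySem.List.slice_natCast_add]
    simp [chunkPairs]
  | case3 a b t ih =>
    rw [pyRange2_cons _ _ (by simp; omega), List.map_cons]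
    rw [show ((pre.length : Int) + 2) = ((pre.length : Int) + ((2:Nat) : Int)) by norm_num]
    rw [PySem.List.slice_natCast_add]
    have hh : (pre ++ a :: b :: t).drop pre.length = a :: b :: t := by simp
    rw [hh]
    have ih' := ih (pre ++ [a, b])
    have e1 : ((pre ++ [a, b]).length : Int) = (pre.length : Int) + ((2:Nat) : Int) := by
      simp
    have e2 : (pre ++ [a, b]) ++ t = pre ++ a :: b :: t := by simp
    rw [e1, e2] at ih'
    rw [show (pre.length : Int) + ((2:Nat):Int) + (t.length : Int)
        = (pre.length : Int) + ((a :: b :: t).length : Int) by push_cast; simp; ring] at ih'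
    rw [ih']
    rfl

theorem chunkPairs_append_even {α : Type} (xs ys : List α) (h : xs.length % 2 = 0) :
    chunkPairs (xs ++ ys) = chunkPairs xs ++ chunkPairs ys := by
  induction xs using chunkPairs.induct with
  | case1 => simp [chunkPairs]
  | case2 a => simp at h
  | case3 a b t ih =>
    have h' : t.length % 2 = 0 := by simp only [List.length_cons] at h; omega
    simp only [List.cons_append, chunkPairs]
    rw [ih h']

theorem rightChunks_append_pair {α : Type} (xs : List α) (b a : α) :
    rightChunks (xs ++ [b, a]) = rightChunks xs ++ [[b, a]] := by
  unfold rightChunks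
  have hl : (xs ++ [b, a]).length % 2 = xs.length % 2 := by
    simp only [List.length_append, List.length_cons, List.length_nil]; omega
  rw [hl]
  rcases Nat.mod_two_eq_zero_or_one xs.length with h | h
  · rw [h]
    rw [if_neg (show ¬((0:Nat) = 1) by decide), if_neg (show ¬((0:Nat) = 1) by decide)]
    simp only [List.drop_zero, List.nil_append]
    rw [chunkPairs_append_even xs [b, a] h]
    rfl
  · rw [h]
    rw [if_pos (show (1:Nat) = 1 from rfl), if_pos (show (1:Nat) = 1 from rfl)]
    have hx : 1 ≤ xs.length := by omega
    rw [List.take_append_of_le_length hx]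
    rw [List.drop_append_of_le_length hx]
    rw [chunkPairs_append_even (xs.drop 1) [b, a] (by simp only [List.length_drop]; omega)]
    simp [chunkPairs]

theorem revchunk {α : Type} (rs : List α) :
    ((chunkPairs rs).map List.reverse).reverse = rightChunks rs.reverse := by
  induction rs using chunkPairs.induct with
  | case1 => simp [chunkPairs, rightChunks]
  | case2 a => simp [chunkPairs, rightChunks]
  | case3 a b t ih =>
    simp only [chunkPairs, List.map_cons, List.reverse_cons]
    rw [ih]
    have e1 : t.reverse ++ [b] ++ [a] = t.reverse ++ [b, a] := by simp
    rw [e1, rightChunks_append_pair]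
    simp


theorem pvRevStr_eq (s : String) : pvRevStr s = String.ofList s.toList.reverse := by
  simp [pvRevStr, PySem.Str.slice?_none_none_neg_one]

theorem pvRevList_eq (k : List String) : pvRevList k = k.reverse := by
  simp [pvRevList, PySem.List.slice?_none_none_neg_one]

theorem strsl (s : String) (a b : Option Int) :
    PySem.Str.slice s a b = String.ofList (PySem.List.slice s.toList a b) := by
  have h := @String.ofList_toList (PySem.Str.slice s a b)
  rw [← h]
  simp [PySem.Str.toList_slice]

theorem mapslice_zero {α : Type} (cs : List α) :
    (PySem.List.pyRange 0 (cs.length : Int) 2).map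
      (fun i => PySem.List.slice cs (some i) (some (i + 2))) = chunkPairs cs := by
  have h := mapslice cs []
  simpa using h

def stepA : List String → String → List String := fun acc value =>
  if 3 ≤ PySem.Str.len value ∧ PySem.Str.pyGet? value 0 ≠ PySem.Str.pyGet? value (-1) then
    let v := pvRevStr value
    let k := (PySem.List.pyRange 0 (PySem.Str.len v) 2).map
      (fun i => pvRevStr (PySem.Str.slice v (some i) (some (i + 2))))
    let k2 := pvRevList k
    k2.foldl (fun acc2 val => acc2 ++ [val]) acc
  else acc ++ [value]

def stepB : List String → String → List String := fun acc value =>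
  if 3 ≤ PySem.Str.len value ∧ PySem.Str.pyGet? value 0 ≠ PySem.Str.pyGet? value (-1) then
    let start := PySem.Int.mod (PySem.Str.len value) 2
    let acc1 := if start ≠ 0 then acc ++ [PySem.Str.slice value (some 0) (some 1)] else acc
    (PySem.List.pyRange start (PySem.Str.len value) 2).foldl
      (fun a i => a ++ [PySem.Str.slice value (some i) (some (i + 2))]) acc1
  else acc ++ [value]

theorem step_eq (acc : List String) (value : String) : stepA acc value = stepB acc value := by
  unfold stepA stepB
  by_cases hc : 3 ≤ PySem.Str.len value ∧ PySem.Str.pyGet? value 0 ≠ PySem.Str.pyGet? value (-1)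
  · rw [if_pos hc, if_pos hc]
    simp only [pvRevStr_eq, pvRevList_eq, PySem.List.foldl_append_singleton_eq_self,
      PySem.List.foldl_append_singleton_eq_map, strsl, String.toList_ofList,
      PySem.Str.len_eq]
    -- A side: acc ++ (map ... ).reverse ; B side: acc1 ++ map ...
    set cs := value.toList with hcs
    have hmod : PySem.Int.mod ((cs.length : Int)) 2 = ((cs.length % 2 : Nat) : Int) := by
      exact_mod_cast PySem.Int.mod_natCast cs.length 2
    rw [hmod]
    have hA : (List.map
          (fun i => String.ofList (PySem.List.slice cs.reverse (some i) (some (i + 2))).reverse)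
          (PySem.List.pyRange 0 ((cs.reverse.length : Nat) : Int) 2)).reverse
        = (rightChunks cs).map String.ofList := by
      rw [show (fun i => String.ofList (PySem.List.slice cs.reverse (some i) (some (i + 2))).reverse)
          = (fun x : List Char => String.ofList x.reverse)
            ∘ (fun i => PySem.List.slice cs.reverse (some i) (some (i + 2))) from rfl]
      rw [← List.map_map, mapslice_zero cs.reverse]
      rw [show (fun x : List Char => String.ofList x.reverse)
          = String.ofList ∘ List.reverse from rfl]
      rw [← List.map_map, ← List.map_reverse, revchunk, List.reverse_reverse]
    rw [hA]
    rcases Nat.mod_two_eq_zero_or_one cs.length with h0 | h1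
    · rw [h0]
      rw [if_neg (by norm_num)]
      have hB : List.map (fun x => String.ofList (PySem.List.slice cs (some x) (some (x + 2))))
          (PySem.List.pyRange ((0:Nat) : Int) ((cs.length : Nat) : Int) 2)
          = (chunkPairs cs).map String.ofList := by
        rw [show ((0:Nat) : Int) = (0 : Int) from rfl]
        rw [show (fun x => String.ofList (PySem.List.slice cs (some x) (some (x + 2))))
            = String.ofList ∘ (fun i => PySem.List.slice cs (some i) (some (i + 2))) from rfl]
        rw [← List.map_map, mapslice_zero cs]
      rw [hB]
      unfold rightChunks
      rw [h0]
      rw [if_neg (by decide), List.drop_zero, List.nil_append]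
    · have hlen3 : 3 ≤ cs.length := by
        have h1' := hc.1
        rw [PySem.Str.len_eq] at h1'
        exact_mod_cast h1'
      match cs, hcs with
      | c :: t, hcs =>
      rw [h1]
      rw [if_pos (by norm_num)]
      have hsl01 : PySem.List.slice (c :: t) (some 0) (some 1) = [c] := by simp [pysem]
      have hB : List.map (fun x => String.ofList (PySem.List.slice (c :: t) (some x) (some (x + 2))))
          (PySem.List.pyRange ((1:Nat) : Int) (((c :: t).length : Nat) : Int) 2)
          = (chunkPairs t).map String.ofList := by
        rw [show (fun x => String.ofList (PySem.List.slice (c :: t) (some x) (some (x + 2))))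
            = String.ofList ∘ (fun i => PySem.List.slice (c :: t) (some i) (some (i + 2))) from rfl]
        rw [← List.map_map]
        have hm := mapslice t [c]
        rw [show (([c] : List Char).length : Int) = ((1:Nat) : Int) by simp] at hm
        rw [show (((1:Nat) : Int) + (t.length : Int)) = (((c :: t).length : Nat) : Int) by
          push_cast; simp; ring] at hm
        rw [show ([c] ++ t : List Char) = c :: t from rfl] at hm
        rw [hm]
      rw [hB, hsl01]
      unfold rightChunks
      rw [h1]
      rw [if_pos (by decide)]
      simp
  · rw [if_neg hc, if_neg hc]

theorem folds_eq (l : List String) (acc : List String) :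
    l.foldl stepA acc = l.foldl stepB acc := by
  induction l generalizing acc with
  | nil => simp only [List.foldl_nil]
  | cons v t ih => simp only [List.foldl_cons, step_eq]; exact ih _

-- ===== VERDICT (by name: the statement is the Claim_ definition above) =====
theorem split_list_4_spec : Claim_equal_split_list_4 := by
  intro l _
  show split_list_4 l = split_list_4_alt l
  have hA : split_list_4 l = l.foldl stepA [] := rfl
  have hB : split_list_4_alt l = l.foldl stepB [] := rfl
  rw [hA, hB]; exact folds_eq l []
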